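-- pv_equiv track=rewrite | github.com/W-Ely/code-challenges | src/string_pyramid.py | watch_pyramid_from_above
-- ===== SOURCE A (Python) =====
-- def watch_pyramid_from_above(characters):
--     if not characters:
--         return characters
--     top = ''
--     for i, chr in enumerate(characters[::-1]):
--         char = chr * (i * 2 + 1)
--         before = characters[::-1][i+1:][::-1]
--         after = characters[::-1][i+1:]
--         line = before + char + after
--         if not top:
--             top = line
--         else:
--             top = line + '\n' + top + '\n' + line
--     return top
-- ===== SOURCE B (Python) =====
-- def watch_pyramid_from_above(characters):
--     n = len(characters)
--     if n == 0:
--         return characters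
--     lines = []
--     for k in range(n):
--         pre = characters[:k]
--         lines.append(pre + characters[k] * (2 * (n - 1 - k) + 1) + pre[::-1])
--     return "\n".join(lines + lines[:-1][::-1])
-- ===== Notes on version B (the rewrite author's own statement) =====
-- stated objective: faster
-- what changed: B computes each of the n distinct pyramid lines exactly once from string prefixes and joins the palindromically mirrored line list in a single pass, instead of A's loop that re-reverses the whole string and re-wraps the entire accumulated result with string concatenation on every iteration; intended as faster (O(n^2) vs O(n^3)) - a timing run measured B 7.3x at n=256 and 205x at n=1024, where A mostly timed out.
import Mathlib
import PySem

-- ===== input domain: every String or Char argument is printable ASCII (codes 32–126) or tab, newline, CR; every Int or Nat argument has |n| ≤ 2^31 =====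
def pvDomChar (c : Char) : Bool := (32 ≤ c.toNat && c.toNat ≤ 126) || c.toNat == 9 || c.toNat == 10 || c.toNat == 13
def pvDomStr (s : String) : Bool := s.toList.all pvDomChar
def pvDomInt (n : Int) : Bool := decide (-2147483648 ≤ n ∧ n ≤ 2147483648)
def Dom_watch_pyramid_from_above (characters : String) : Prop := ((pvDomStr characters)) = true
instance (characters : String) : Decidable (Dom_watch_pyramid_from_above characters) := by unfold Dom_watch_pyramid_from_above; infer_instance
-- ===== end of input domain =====

-- B replaces A's rebuild-and-wrap loop (each step re-reverses the string and re-wraps the whole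
-- accumulated pyramid) by computing each of the n distinct lines once and mirroring the line list
-- palindromically with a single join; intended as faster (a timing run measured B 7.3x at n=256
-- and 205x at n=1024, where A mostly timed out). Same return value everywhere.

-- ===== PORT A =====
-- line built in one iteration of A's loop: before + char + after  (characters[::-1] is rev)
def pvLineA (rev : List Char) (ic : Int × Char) : List Char :=
  (PySem.List.slice rev (some (ic.1 + 1)) none).reverse
    ++ PySem.List.pyRepeat [ic.2] (ic.1 * 2 + 1)
    ++ PySem.List.slice rev (some (ic.1 + 1)) none

-- one iteration of A's loop body
def pvStepA (rev : List Char) (top : List Char) (ic : Int × Char) : List Char :=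
  let line := pvLineA rev ic
  if top = [] then line else line ++ '\n' :: (top ++ '\n' :: line)

def watch_pyramid_from_above (characters : String) : String :=
  let cs := characters.toList
  if cs = [] then characters
  else
    -- characters[::-1] ported as cs.reverse (PySem.List.slice?_none_none_neg_one)
    String.ofList ((PySem.List.enumerate cs.reverse 0).foldl (pvStepA cs.reverse) [])

-- ===== PORT B =====
-- line k of Source B's loop: pre + characters[k]*(2*(n-1-k)+1) + pre[::-1]  (k < n, so getD's default is dead)
def pvLineB (cs : List Char) (n k : Nat) : List Char :=
  let pre := cs.take k
  pre ++ List.replicate (2 * (n - 1 - k) + 1) (cs.getD k ' ') ++ pre.reverse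

def watch_pyramid_from_above_alt (characters : String) : String :=
  let cs := characters.toList
  let n := cs.length
  if n = 0 then characters
  else
    let lines := (List.range n).map (pvLineB cs n)
    String.ofList (PySem.Chars.join ['\n'] (lines ++ lines.dropLast.reverse))

-- ===== PRECONDITION & SPEC =====
def Spec_watch_pyramid_from_above (characters : String) (out : String) : Prop := out = watch_pyramid_from_above_alt characters
instance (characters : String) (out : String) : Decidable (Spec_watch_pyramid_from_above characters out) := by unfold Spec_watch_pyramid_from_above; infer_instance

-- ===== CLAIM (what is proved, stated in full; the proofs are below) =====
def Claim_equal_watch_pyramid_from_above : Prop := ∀ (characters : String), Dom_watch_pyramid_from_above characters → Spec_watch_pyramid_from_above characters (watch_pyramid_from_above characters)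

-- ===== LEMMAS AND PROOFS =====

-- join of a cons with nonempty tail
lemma pv_join_cons (a : List Char) (ls : List (List Char)) (h : ls ≠ []) :
    PySem.Chars.join ['\n'] (a :: ls) = a ++ '\n' :: PySem.Chars.join ['\n'] ls := by
  cases ls with
  | nil => exact absurd rfl h
  | cons b rest => rw [PySem.Chars.join_cons_cons]; simp

-- join with '\n' of a list containing a distinguished nonempty element is nonempty
lemma pv_join_ne_nil (xs ys : List (List Char)) (top : List Char) (h : top ≠ []) :
    PySem.Chars.join ['\n'] (xs ++ top :: ys) ≠ [] := by
  cases xs with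
  | nil =>
    cases ys with
    | nil => simpa [PySem.Chars.join_singleton] using h
    | cons y ys => rw [List.nil_append, pv_join_cons _ _ (by simp)]; simp [h]
  | cons a xs => rw [List.cons_append, pv_join_cons _ _ (by simp)]; simp

-- appending one more block on the right of a '\n'-join
lemma pv_join_append_singleton (xs : List (List Char)) (b : List Char) (h : xs ≠ []) :
    PySem.Chars.join ['\n'] (xs ++ [b]) = PySem.Chars.join ['\n'] xs ++ '\n' :: b := by
  induction xs with
  | nil => exact absurd rfl h
  | cons a xs ih =>
    cases xs with
    | nil => simp [PySem.Chars.join_cons_cons, PySem.Chars.join_singleton]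
    | cons c cs =>
      rw [show ((a :: c :: cs) ++ [b]) = a :: ((c :: cs) ++ [b]) by simp,
          pv_join_cons a ((c :: cs) ++ [b]) (by simp), ih (by simp),
          pv_join_cons a (c :: cs) (by simp)]
      simp

-- characterization of A's fold from a nonempty accumulator
lemma pv_foldA (rev : List Char) (l : List (Int × Char)) (top : List Char) (h : top ≠ []) :
    l.foldl (pvStepA rev) top
      = PySem.Chars.join ['\n'] ((l.map (pvLineA rev)).reverse ++ top :: l.map (pvLineA rev)) := by
  induction l using List.reverseRecOn with
  | nil => simp [PySem.Chars.join_singleton]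
  | append_singleton l x ih =>
    have h1 : ((l ++ [x]).map (pvLineA rev)).reverse ++ top :: (l ++ [x]).map (pvLineA rev)
        = pvLineA rev x
          :: (((l.map (pvLineA rev)).reverse ++ top :: l.map (pvLineA rev)) ++ [pvLineA rev x]) := by
      simp
    rw [List.foldl_append, List.foldl_cons, List.foldl_nil, ih, h1,
        pv_join_cons (pvLineA rev x) _ (by simp),
        pv_join_append_singleton ((l.map (pvLineA rev)).reverse ++ top :: l.map (pvLineA rev))
          (pvLineA rev x) (by simp)]
    rw [pvStepA, if_neg (pv_join_ne_nil _ _ _ h)]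

-- each of A's lines is one of B's lines, at the mirrored index
lemma pv_lineA_eq_lineB (cs : List Char) (j : Nat) (hj : j < cs.length) :
    pvLineA cs.reverse ((j : Int), cs.reverse.getD j ' ') = pvLineB cs cs.length (cs.length - 1 - j) := by
  have hlen : j < cs.reverse.length := by simpa using hj
  have hslice : PySem.List.slice cs.reverse (some ((j : Int) + 1)) none = cs.reverse.drop (j + 1) := by
    rw [show ((j : Int) + 1) = ((j + 1 : Nat) : Int) by push_cast; ring,
        PySem.List.slice_from_natCast]
  have hdrop : (cs.reverse.drop (j + 1)).reverse = cs.take (cs.length - 1 - j) := by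
    rw [← List.rdrop_eq_reverse_drop_reverse, List.rdrop]
    congr 1; omega
  have hafter : cs.reverse.drop (j + 1) = (cs.take (cs.length - 1 - j)).reverse := by
    rw [← hdrop, List.reverse_reverse]
  have hchar : cs.reverse.getD j ' ' = cs.getD (cs.length - 1 - j) ' ' := by
    rw [List.getD_eq_getElem _ _ hlen, List.getD_eq_getElem _ _ (by omega),
        List.getElem_reverse]
  have hrep : PySem.List.pyRepeat [cs.reverse.getD j ' '] ((j : Int) * 2 + 1)
      = List.replicate (2 * (cs.length - 1 - (cs.length - 1 - j)) + 1) (cs.getD (cs.length - 1 - j) ' ') := by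
    rw [PySem.List.pyRepeat_singleton, hchar]
    congr 1
    have h2 : ((j : Int) * 2 + 1).toNat = j * 2 + 1 := by omega
    rw [h2]; omega
  rw [pvLineA, pvLineB, hslice, hdrop, hrep, hafter]

-- reversing a map over range reflects the index
lemma pv_reverse_range_map (f : Nat → List Char) (n : Nat) :
    (List.range n).map (fun j => f (n - 1 - j)) = ((List.range n).map f).reverse := by
  have hrr : (List.range n).reverse = (List.range n).map (fun x => n - 1 - x) := by
    conv_lhs => rw [List.range_eq_range']
    rw [List.reverse_range']
    exact List.map_congr_left (fun x _ => by omega)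
  rw [← List.map_reverse, hrr, List.map_map]
  exact List.map_congr_left (fun x _ => rfl)

-- A's list of lines (in loop order) is B's list of lines reversed
lemma pv_mapA_eq (cs : List Char) :
    (PySem.List.enumerate cs.reverse 0).map (pvLineA cs.reverse)
      = ((List.range cs.length).map (pvLineB cs cs.length)).reverse := by
  rw [PySem.List.enumerate_eq_map_pyRange cs.reverse ' ', List.map_map]
  rw [show PySem.List.len cs.reverse = ((cs.length : Nat) : Int) by simp [PySem.List.len_eq]]
  rw [PySem.List.pyRange_zero_natCast, List.map_map]
  have hmap : ∀ j ∈ List.range cs.length,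
      ((pvLineA cs.reverse ∘ fun j => (j, PySem.List.pyGetD cs.reverse j ' ')) ∘ fun (k : Nat) => (k : Int)) j
        = pvLineB cs cs.length (cs.length - 1 - j) := by
    intro j hj
    rw [List.mem_range] at hj
    simp only [Function.comp_apply, PySem.List.pyGetD_natCast]
    exact pv_lineA_eq_lineB cs j hj
  rw [List.map_congr_left hmap, pv_reverse_range_map]

-- palindromic rearrangement: A's line order equals B's line order
lemma pv_palindrome (l : List (List Char)) :
    (l.reverse.tail).reverse ++ l.reverse = l ++ l.dropLast.reverse := by
  cases hl : l.isEmpty with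
  | true => simp [List.isEmpty_iff.mp hl]
  | false =>
    have h : l ≠ [] := by simpa using List.isEmpty_eq_false_iff.mp hl
    rw [List.tail_reverse, List.reverse_reverse]
    conv_lhs => rw [← List.dropLast_concat_getLast h]
    conv_rhs => rw [← List.dropLast_concat_getLast h]
    simp

-- assembling: if A's line list (head L0, rest Mt) is B's line list reversed, the two join orders agree
lemma pv_assemble (L0 : List Char) (Mt LB : List (List Char)) (h : L0 :: Mt = LB.reverse) :
    Mt.reverse ++ L0 :: Mt = LB ++ LB.dropLast.reverse := by
  have ht : Mt = LB.reverse.tail := by rw [← h]; rfl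
  rw [h, ht]
  exact pv_palindrome LB

-- ===== VERDICT (by name: the statement is the Claim_ definition above) =====
theorem watch_pyramid_from_above_spec : Claim_equal_watch_pyramid_from_above := by
  intro s _
  unfold Spec_watch_pyramid_from_above watch_pyramid_from_above watch_pyramid_from_above_alt
  by_cases hnil : s.toList = []
  · simp [hnil]
  · simp only [hnil, List.length_eq_zero_iff, if_false]
    obtain ⟨c, t, hrev⟩ := List.exists_cons_of_ne_nil (by simpa using hnil :
      s.toList.reverse ≠ [])
    congr 1
    have henum : PySem.List.enumerate s.toList.reverse 0
        = (0, c) :: PySem.List.enumerate t 1 := by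
      rw [hrev, PySem.List.enumerate_cons]; norm_num
    have hfirst : pvStepA s.toList.reverse [] (0, c) = pvLineA s.toList.reverse (0, c) := by
      simp [pvStepA]
    have hne : pvLineA s.toList.reverse (0, c) ≠ [] := by
      rw [pvLineA]
      simp [PySem.List.pyRepeat_singleton]
    rw [henum, List.foldl_cons, hfirst, pv_foldA _ _ _ hne]
    have hcons : pvLineA s.toList.reverse (0, c)
          :: (PySem.List.enumerate t 1).map (pvLineA s.toList.reverse)
        = ((List.range s.toList.length).map (pvLineB s.toList s.toList.length)).reverse := by
      rw [← pv_mapA_eq, henum, List.map_cons]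
    rw [pv_assemble _ _ _ hcons]
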